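-- pv_equiv track=rewrite | github.com/Dr0x3525/Proyecto-final-programacion | ejercicios_parciales/ejercicios_recuperacion_parcial_2/ejercicio_4.py | encontrar_penultimo_fib
-- ===== SOURCE A (Python) =====
-- def comprobar_ser_fibbonaci(numero):
--     numero = int(numero)
--     f1 = 0
--     f2 = 1
--     while f1 <= numero:
--         if f1 == numero:
--             return True
--         temp =  f1
--         f1 = f2
--         f2 = f1 + temp
--     return False
--
-- def encontrar_penultimo_fib(vector):
--     contador_fib = 0
--     for indice in range(len(vector)-1,0,-1):
--         numero = vector[indice]
--         if comprobar_ser_fibbonaci(numero):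
--             contador_fib += 1
--             if contador_fib == 2:
--                 return indice
--     return None
-- ===== SOURCE B (Python) =====
-- def comprobar_ser_fibbonaci(numero):
--     numero = int(numero)
--     f1 = 0
--     f2 = 1
--     while f1 <= numero:
--         if f1 == numero:
--             return True
--         temp =  f1
--         f1 = f2
--         f2 = f1 + temp
--     return False
--
-- def encontrar_penultimo_fib(vector):
--     indices_fib = []
--     for indice in range(1, len(vector)):
--         if comprobar_ser_fibbonaci(vector[indice]):
--             indices_fib.append(indice)
--     if len(indices_fib) >= 2:
--         return indices_fib[-2]
--     return None
-- ===== Notes on version B (the rewrite author's own statement) =====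
-- stated objective: alternative
-- what changed: Replaced the right-to-left short-circuit counter scan with a forward collect-all-Fibonacci-indices pass followed by selecting the second-to-last collected index.
import Mathlib
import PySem

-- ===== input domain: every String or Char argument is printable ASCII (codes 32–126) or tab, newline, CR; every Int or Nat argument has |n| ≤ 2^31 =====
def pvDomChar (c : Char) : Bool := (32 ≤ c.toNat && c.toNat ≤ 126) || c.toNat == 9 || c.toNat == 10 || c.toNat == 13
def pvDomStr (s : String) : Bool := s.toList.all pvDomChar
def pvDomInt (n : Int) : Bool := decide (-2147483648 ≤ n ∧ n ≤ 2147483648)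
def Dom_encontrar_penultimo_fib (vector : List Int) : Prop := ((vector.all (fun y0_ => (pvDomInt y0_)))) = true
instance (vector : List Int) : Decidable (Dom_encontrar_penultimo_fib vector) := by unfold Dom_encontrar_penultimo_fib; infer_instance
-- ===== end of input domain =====

-- B replaces A's right-to-left counter scan by a forward collect-then-select decomposition (objective: alternative).

-- ===== PORT A =====
-- while f1 <= numero: … ; the proof arguments 0 ≤ f1 / 1 ≤ f2 are invariants of the Python loop,
-- carried only to justify termination (f1+f2 strictly increases while f1 ≤ numero).
def fibLoop (numero f1 f2 : Int) (_h1 : 0 ≤ f1) (_h2 : 1 ≤ f2) : Bool :=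
  if f1 ≤ numero then
    if f1 = numero then true
    else fibLoop numero f2 (f2 + f1) (by omega) (by omega)
  else false
termination_by ((numero + 1 - f1).toNat + (numero + 1 - f2).toNat)
decreasing_by omega

def comprobar_ser_fibbonaci (numero : Int) : Bool :=
  fibLoop numero 0 1 (by omega) (by omega)

-- the for-loop with early return; every index produced by range(len-1,0,-1) is in range, so vector[indice] is pyGetD vector i 0
def loopA (vector : List Int) : List Int → Int → Option Int
  | [], _ => none
  | i :: rest, contador_fib =>
      let numero := PySem.List.pyGetD vector i 0
      if comprobar_ser_fibbonaci numero then
        if contador_fib + 1 = 2 then some i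
        else loopA vector rest (contador_fib + 1)
      else loopA vector rest contador_fib

def encontrar_penultimo_fib (vector : List Int) : Option Int :=
  loopA vector (PySem.List.pyRange ((vector.length : Int) - 1) 0 (-1)) 0

-- ===== PORT B =====
def encontrar_penultimo_fib_alt (vector : List Int) : Option Int :=
  let indices_fib :=
    (PySem.List.pyRange 1 (vector.length : Int) 1).foldl
      (fun acc i =>
        if comprobar_ser_fibbonaci (PySem.List.pyGetD vector i 0) then acc ++ [i] else acc) []
  if 2 ≤ indices_fib.length then PySem.List.pyGet? indices_fib (-2) else none

-- ===== PRECONDITION & SPEC =====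
def Spec_encontrar_penultimo_fib (vector : List Int) (out : Option Int) : Prop := out = encontrar_penultimo_fib_alt vector
instance (vector : List Int) (out : Option Int) : Decidable (Spec_encontrar_penultimo_fib vector out) := by unfold Spec_encontrar_penultimo_fib; infer_instance

-- ===== CLAIM (what is proved, stated in full; the proofs are below) =====
def Claim_equal_encontrar_penultimo_fib : Prop := ∀ (vector : List Int), Dom_encontrar_penultimo_fib vector → Spec_encontrar_penultimo_fib vector (encontrar_penultimo_fib vector)

-- ===== LEMMAS AND PROOFS =====

-- with the counter already at 1, A returns the first passing index
theorem loopA_one (vector : List Int) (zs : List Int) :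
    loopA vector zs 1 = (zs.filter (fun i => comprobar_ser_fibbonaci (PySem.List.pyGetD vector i 0)))[0]? := by
  induction zs with
  | nil => simp [loopA]
  | cons i rest ih =>
      by_cases h : comprobar_ser_fibbonaci (PySem.List.pyGetD vector i 0) = true
      · simp [loopA, h]
      · simp [loopA, h, ih]

-- from counter 0, A returns the second passing index
theorem loopA_zero (vector : List Int) (zs : List Int) :
    loopA vector zs 0 = (zs.filter (fun i => comprobar_ser_fibbonaci (PySem.List.pyGetD vector i 0)))[1]? := by
  induction zs with
  | nil => simp [loopA]
  | cons i rest ih =>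
      by_cases h : comprobar_ser_fibbonaci (PySem.List.pyGetD vector i 0) = true
      · simp [loopA, h, loopA_one]
      · simp [loopA, h, ih]

-- selecting the second-to-last entry after a full collect equals the second element of the reversed filtered list
theorem reverse_getElem?_one_eq (F : List Int) :
    F.reverse[1]? = if 2 ≤ F.length then PySem.List.pyGet? F (-2) else none := by
  by_cases h : 2 ≤ F.length
  · rw [PySem.List.pyGet?_neg_ofNat F 2 (by omega) (by omega)]
    have h1 : 1 < F.length := by omega
    rw [if_pos h, List.getElem?_reverse (by simpa using h1)]
    have : F.length - 1 - 1 = F.length - 2 := by omega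
    rw [this]
  · rw [if_neg h]
    apply List.getElem?_eq_none
    simp
    omega

-- ===== VERDICT (by name: the statement is the Claim_ definition above) =====
theorem encontrar_penultimo_fib_spec : Claim_equal_encontrar_penultimo_fib := by
  intro vector _
  unfold Spec_encontrar_penultimo_fib encontrar_penultimo_fib encontrar_penultimo_fib_alt
  have hr : PySem.List.pyRange ((vector.length : Int) - 1) 0 (-1)
      = (PySem.List.pyRange 1 (vector.length : Int) 1).reverse := by
    have := PySem.List.pyRange_neg_one_eq_reverse ((vector.length : Int) - 1) 0
    simpa using this
  rw [hr, loopA_zero, PySem.List.foldl_append_if_eq_filter, List.filter_reverse]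
  simpa using reverse_getElem?_one_eq
    ((PySem.List.pyRange 1 (vector.length : Int) 1).filter
      (fun i => comprobar_ser_fibbonaci (PySem.List.pyGetD vector i 0)))
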